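-- pv_equiv track=rewrite | github.com/ChethanKumar-K/Hackerrank | Samsung/CountSortedRows.py | sortedCount
-- ===== SOURCE A (Python) =====
-- def sortedCount(N,M,Mat):
--     #code here
--     count = 0
--     for i in range(N):
--         test_list = Mat[i]
--         res1 = all(i < j for i, j in zip(test_list, test_list[1:]))
--         res2 = all(i > j for i, j in zip(test_list, test_list[1:]))
--         if(res1 or res2):
--             count += 1
--     return count
-- ===== SOURCE B (Python) =====
-- def sortedCount(N, M, Mat):
--     count = 0
--     for i, row in enumerate(Mat):
--         if i >= N:
--             break
--         srt = sorted(row)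
--         if len(set(row)) == len(row) and (row == srt or row == srt[::-1]):
--             count += 1
--     return count
-- ===== Notes on version B (the rewrite author's own statement) =====
-- stated objective: idiomatic
-- what changed: Instead of indexing Mat by range(N) and testing adjacent pairs with two zip scans per row, B walks the rows with enumerate (stopping at N) and counts a row when its elements are distinct (len(set)==len) and it equals its sorted or reverse-sorted order, which is exactly strict monotonicity.
import Mathlib
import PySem

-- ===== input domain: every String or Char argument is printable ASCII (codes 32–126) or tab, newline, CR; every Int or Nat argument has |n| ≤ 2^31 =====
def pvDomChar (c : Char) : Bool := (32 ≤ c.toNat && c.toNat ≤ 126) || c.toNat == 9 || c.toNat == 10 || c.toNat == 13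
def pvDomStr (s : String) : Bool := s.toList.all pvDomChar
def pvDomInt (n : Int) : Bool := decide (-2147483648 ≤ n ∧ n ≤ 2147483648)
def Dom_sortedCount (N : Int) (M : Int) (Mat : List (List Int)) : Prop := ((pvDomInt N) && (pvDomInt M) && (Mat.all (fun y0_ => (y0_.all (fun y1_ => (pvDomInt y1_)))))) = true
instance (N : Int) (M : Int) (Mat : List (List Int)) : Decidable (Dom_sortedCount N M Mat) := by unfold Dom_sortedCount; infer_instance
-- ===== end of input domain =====

-- B counts a row when it equals its sorted (or reverse-sorted) order and its elements are
-- distinct (strict monotonicity via sorting), instead of A's two adjacent-pair zip scans.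


-- ===== PORT A =====
-- Mat[i] is ported as pyGetD (default []); Pre_ below restricts to indices in range, where
-- the Python's Mat[i] returns (outside Pre_ the Python raises IndexError).
def sortedCount (N : Int) (M : Int) (Mat : List (List Int)) : Int :=
  (PySem.List.pyRange 0 N).foldl (fun count i =>
    let test_list := PySem.List.pyGetD Mat i []
    let res1 := (test_list.zip (PySem.List.slice test_list (some 1) none)).all
      (fun p => decide (p.1 < p.2))
    let res2 := (test_list.zip (PySem.List.slice test_list (some 1) none)).all
      (fun p => decide (p.1 > p.2))
    if res1 || res2 then count + 1 else count) 0

-- ===== PORT B =====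
-- srt[::-1] is ported as List.reverse (exact: PySem.List.slice?_none_none_neg_one);
-- the for/enumerate/break loop is the structural recursion altLoop.
def altTest (row : List Int) : Bool :=
  let srt := PySem.List.sorted row (fun x => x)
  (PySem.Set.len (PySem.Set.ofList row) == PySem.List.len row)
    && (row == srt || row == srt.reverse)

def altLoop (N : Int) (i : Nat) (count : Int) : List (List Int) → Int
  | [] => count
  | row :: rest =>
    if N ≤ (i : Int) then count
    else altLoop N (i + 1) (if altTest row then count + 1 else count) rest

def sortedCount_alt (N : Int) (M : Int) (Mat : List (List Int)) : Int :=
  altLoop N 0 0 Mat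

-- ===== PRECONDITION & SPEC =====
-- Pre_ is exactly the inputs on which the Python A returns: for N > len(Mat) A raises
-- IndexError on Mat[i] (negative N is fine: the loop runs zero times).
def Pre_sortedCount (N : Int) (M : Int) (Mat : List (List Int)) : Prop :=
  N ≤ Mat.length
instance (N : Int) (M : Int) (Mat : List (List Int)) : Decidable (Pre_sortedCount N M Mat) := by
  unfold Pre_sortedCount; infer_instance
def pvWitness_sortedCount : Int × Int × List (List Int) := (2, 3, [[1, 2, 3], [3, 1, 2]])

def Spec_sortedCount (N : Int) (M : Int) (Mat : List (List Int)) (out : Int) : Prop := out = sortedCount_alt N M Mat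
instance (N : Int) (M : Int) (Mat : List (List Int)) (out : Int) : Decidable (Spec_sortedCount N M Mat out) := by unfold Spec_sortedCount; infer_instance

-- ===== CLAIM (what is proved, stated in full; the proofs are below) =====
def Claim_equal_sortedCount : Prop := ∀ (N : Int) (M : Int) (Mat : List (List Int)), Dom_sortedCount N M Mat → Pre_sortedCount N M Mat → Spec_sortedCount N M Mat (sortedCount N M Mat)
-- ===== LEMMAS AND PROOFS =====

-- all adjacent pairs satisfy a transitive relation ↔ Pairwise
lemma adj_all_iff {R : Int → Int → Prop} [DecidableRel R]
    (htrans : ∀ a b c, R a b → R b c → R a c) :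
    ∀ row : List Int,
      (((row.zip row.tail).all fun p => decide (R p.1 p.2)) = true) ↔ row.Pairwise R
  | [] => by simp
  | [a] => by simp
  | a :: b :: t => by
    have ih := adj_all_iff htrans (b :: t)
    simp only [List.tail_cons, List.zip_cons_cons, List.all_cons, Bool.and_eq_true,
      decide_eq_true_eq, List.pairwise_cons] at *
    constructor
    · rintro ⟨hab, hrest⟩
      have hp := ih.mp hrest
      refine ⟨?_, hp⟩
      intro x hx
      rcases List.mem_cons.mp hx with rfl | hx
      · exact hab
      · exact htrans _ _ _ hab (hp.1 x hx)
    · rintro ⟨hall, hp⟩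
      exact ⟨hall b (List.mem_cons_self ..), ih.mpr hp⟩

lemma set_len_eq_iff (row : List Int) :
    ((PySem.Set.ofList row).length = row.length) ↔ row.Nodup := by
  have hperm : (PySem.Set.ofList row).Perm row.dedup := by
    rw [List.perm_ext_iff_of_nodup (PySem.Set.nodup_ofList row) (List.nodup_dedup row)]
    intro a
    rw [PySem.Set.mem_ofList, List.mem_dedup]
  rw [hperm.length_eq]
  constructor
  · intro h
    rw [← List.dedup_eq_self]
    exact (List.dedup_sublist row).eq_of_length h
  · intro h
    rw [List.dedup_eq_self.mpr h]

-- the per-row tests of A and B agree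
lemma row_tests_eq (row : List Int) :
    (((row.zip (PySem.List.slice row (some 1) none)).all (fun p => decide (p.1 < p.2)))
      || ((row.zip (PySem.List.slice row (some 1) none)).all (fun p => decide (p.1 > p.2))))
    = ((PySem.Set.len (PySem.Set.ofList row) == PySem.List.len row)
        && (row == PySem.List.sorted row (fun x => x)
            || row == (PySem.List.sorted row (fun x => x)).reverse)) := by
  rw [PySem.List.slice_from_one]
  rw [Bool.eq_iff_iff]
  simp only [Bool.or_eq_true, Bool.and_eq_true, beq_iff_eq]
  rw [adj_all_iff (R := fun a b : Int => a < b) (fun a b c h1 h2 => lt_trans h1 h2) row,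
      adj_all_iff (R := fun a b : Int => a > b) (fun a b c h1 h2 => lt_trans h2 h1) row]
  have hlen : (PySem.Set.len (PySem.Set.ofList row) = PySem.List.len row) ↔ row.Nodup := by
    rw [← set_len_eq_iff row]
    simp [PySem.Set.len, PySem.List.len]
  rw [hlen]
  constructor
  · rintro (h | h)
    · have hnd : row.Nodup := h.imp ne_of_lt
      refine ⟨hnd, Or.inl ?_⟩
      exact (PySem.List.sorted_eq_of_perm_of_pairwise_lt row row (fun x => x)
        (List.Perm.refl row) h).symm
    · have hnd : row.Nodup := h.imp fun hab => (ne_of_lt hab).symm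
      refine ⟨hnd, Or.inr ?_⟩
      have : PySem.List.sorted row (fun x => x) = row.reverse := by
        apply PySem.List.sorted_eq_of_perm_of_pairwise_lt row row.reverse (fun x => x)
          (row.reverse_perm)
        exact List.pairwise_reverse.mpr h
      rw [this, List.reverse_reverse]
  · rintro ⟨hnd, h | h⟩
    · left
      have hle : row.Pairwise (fun a b : Int => a ≤ b) := by
        have := PySem.List.sorted_pairwise row (fun x => x)
        rwa [← h] at this
      exact (hle.and hnd).imp fun ⟨h1, h2⟩ => lt_of_le_of_ne h1 h2
    · right
      have hrev : PySem.List.sorted row (fun x => x) = row.reverse := by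
        have h2 := congrArg List.reverse h
        rw [List.reverse_reverse] at h2
        exact h2.symm
      have hle : row.Pairwise (fun a b : Int => b ≤ a) := by
        have := PySem.List.sorted_pairwise row (fun x => x)
        rw [hrev, List.pairwise_reverse] at this
        exact this
      exact (hle.and hnd).imp fun ⟨h1, h2⟩ => lt_of_le_of_ne h1 h2.symm

-- enumerate-with-break as a take-then-fold
lemma altLoop_eq (N : Int) :
    ∀ (Mat : List (List Int)) (i : Nat) (count : Int),
      altLoop N i count Mat =
        (Mat.take (N - i).toNat).foldl
          (fun c row => if altTest row then c + 1 else c) count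
  | [], i, count => by simp [altLoop]
  | row :: rest, i, count => by
    rw [altLoop]
    by_cases h : N ≤ (i : Int)
    · rw [if_pos h]
      have : (N - i).toNat = 0 := by omega
      simp [this]
    · rw [if_neg h]
      have hk : (N - i).toNat = (N - (i + 1 : Nat)).toNat + 1 := by push_cast; omega
      rw [altLoop_eq N rest (i + 1) _, hk, List.take_succ_cons, List.foldl_cons]

-- ===== VERDICT (by name: the statement is the Claim_ definition above) =====
theorem sortedCount_spec : Claim_equal_sortedCount := by
  intro N M Mat _ hpre
  unfold Spec_sortedCount sortedCount sortedCount_alt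
  rw [altLoop_eq]
  have htoNat : (N - (0 : Nat)).toNat = N.toNat := by omega
  rw [htoNat]
  rcases Int.lt_or_le N 0 with hneg | hN0
  · rw [PySem.List.pyRange_one_eq_nil (by omega)]
    have : N.toNat = 0 := by omega
    simp [this]
  · set stepA := fun (count : Int) (test_list : List Int) =>
      if ((test_list.zip (PySem.List.slice test_list (some 1) none)).all
            (fun p => decide (p.1 < p.2)))
          || ((test_list.zip (PySem.List.slice test_list (some 1) none)).all
            (fun p => decide (p.1 > p.2)))
      then count + 1 else count with hstepA
    have hn : N.toNat ≤ Mat.length := by unfold Pre_sortedCount at hpre; omega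
    have hlen : (Mat.take N.toNat).length = N.toNat := by
      simp [List.length_take, hn]
    calc (PySem.List.pyRange 0 N).foldl
          (fun count i => stepA count (PySem.List.pyGetD Mat i [])) 0
        = (PySem.List.pyRange 0 N).foldl
          (fun count i => stepA count (PySem.List.pyGetD (Mat.take N.toNat) i [])) 0 := by
          apply PySem.List.foldl_congr_mem
          intro acc i hi
          rw [PySem.List.mem_pyRange_one] at hi
          have h1 : i < (Mat.length : Int) := by omega
          have h2 : i < ((Mat.take N.toNat).length : Int) := by rw [hlen]; omega
          rw [PySem.List.pyGetD_eq_getElem Mat [] hi.1 h1,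
              PySem.List.pyGetD_eq_getElem (Mat.take N.toNat) [] hi.1 h2,
              List.getElem_take]
      _ = (Mat.take N.toNat).foldl stepA 0 := by
          have hlenT : PySem.List.len (Mat.take N.toNat) = N := by
            simp only [PySem.List.len, hlen]; omega
          have := PySem.List.foldl_pyRange_pyGetD (Mat.take N.toNat) [] stepA 0
            (a := 0) le_rfl
          rw [hlenT] at this
          simpa using this
      _ = (Mat.take N.toNat).foldl
            (fun c row => if altTest row then c + 1 else c) 0 := by
          apply PySem.List.foldl_congr_mem
          intro acc row _
          rw [hstepA]
          simp only [altTest, row_tests_eq row]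
          rfl
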